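-- pv_equiv track=rewrite | github.com/MylChau/Py | metro_assignment_topological13.py | dic_in_degrees_edges
-- ===== SOURCE A (Python) =====
-- def prepare(mylist):
--     lS_liste_station=[]#accueille le numéro et nom des stations
--     lS_routes=[]#accueille des doublets[source-destination]
--
--     for row in mylist:#la séparation se fera sur le nombre de caractères codés en première colonne
--         S_first_item=row[0]
--
--         if len(S_first_item)==4:#les stations sont codées avec 4caractères (ajouts de zéros)
--             lS_liste_station.append(row)
--         elif len(S_first_item)<4:#les stations sont codées avec au maximum trois caractères pour les trajets
--             lS_routes.append(row)
--
--     return lS_routes#retourne la liste des doublets [source-destination]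
--
-- def dic_edges_str_list(mylist):
--     lS_weighted_routes=prepare(mylist)
--     dict_list_routes={}
--     for line in lS_weighted_routes:
--         sL_edge=str([line[0],line[1]])
--         dict_list_routes[sL_edge]=[line[0],line[1]]
--     return dict_list_routes
--
-- def dic_parents(mylist):
--     dict_edges_transformed=dic_edges_str_list(mylist)
--     dict_parents={}
--     for edge in dict_edges_transformed:
--         sL_station_values=dict_edges_transformed[edge]
--         s_start_station=sL_station_values[0]
--         for edge2 in dict_edges_transformed:
--             sL_station_values2=dict_edges_transformed[edge2]
--             s_end_station=sL_station_values2[1]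
--             if s_start_station==s_end_station:
--                 if edge not in dict_parents.keys():
--                     dict_parents[edge]=[edge2]
--                 else:
--                     dict_parents[edge].append(edge2)
--     return dict_parents
--
-- def dic_in_degrees_edges(mylist):#create a dictonary{weighted edge:nb in_degrees}
--     dict_parent=dic_parents(mylist)
--     dict_in_degrees={}
--     for edge in dict_parent:
--         lS_temp_values=dict_parent[edge]
--         n_in_degrees=len(lS_temp_values)
--         dict_in_degrees[edge]=n_in_degrees
--
--     return dict_in_degrees
-- ===== SOURCE B (Python) =====
-- def dic_in_degrees_edges(mylist):
--     # one pass: collect route edges (rows whose first field has < 4 chars), keyed like A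
--     edges = {}
--     for row in mylist:
--         if len(row[0]) < 4:
--             edges[str([row[0], row[1]])] = (row[0], row[1])
--     # count destinations once
--     dest_count = {}
--     for a, b in edges.values():
--         dest_count[b] = dest_count.get(b, 0) + 1
--     # emit only edges whose source is some edge's destination
--     return {k: dest_count[a] for k, (a, b) in edges.items() if a in dest_count}
-- ===== Notes on version B (the rewrite author's own statement) =====
-- stated objective: alternative
-- what changed: A builds, for every edge, the full list of parent edges by rescanning the whole edge dict (nested loops) and then maps those lists to their lengths; B collects the route edges in one pass, builds a counter of destination stations once, and emits each edge's in-degree by a single dictionary lookup of its source station (quadratic-in-distinct-edges scan removed; not measurably faster on the benchmark's duplicate-heavy inputs).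
import Mathlib
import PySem

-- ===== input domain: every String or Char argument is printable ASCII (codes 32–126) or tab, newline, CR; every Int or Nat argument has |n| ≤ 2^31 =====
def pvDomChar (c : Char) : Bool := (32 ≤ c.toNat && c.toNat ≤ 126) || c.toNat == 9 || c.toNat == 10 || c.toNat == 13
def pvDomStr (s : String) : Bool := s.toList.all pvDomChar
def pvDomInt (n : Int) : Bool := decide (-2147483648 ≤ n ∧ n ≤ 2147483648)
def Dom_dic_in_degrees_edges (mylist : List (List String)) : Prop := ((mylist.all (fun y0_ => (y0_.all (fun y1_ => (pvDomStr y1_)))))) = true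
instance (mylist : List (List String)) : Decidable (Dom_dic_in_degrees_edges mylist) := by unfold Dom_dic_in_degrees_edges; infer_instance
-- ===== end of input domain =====

-- B replaces A's nested scans that build per-edge parent lists by a destination counter built in one pass over the edge dict (objective: alternative algorithm; not measurably faster on the benchmarked inputs).

-- ===== PORT A =====
-- Python's str([x, y]) for two strings: '[' + repr(x) + ', ' + repr(y) + ']'.  repr is hand-ported
-- here (no PySem primitive); exact on the Dom charset (printable ASCII plus tab/newline/CR):
-- quote is ' unless the string contains ' and no "; backslash, the quote char, tab, newline, CR are escaped.
def pyReprStr (s : String) : String :=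
  let cs := s.toList
  let q : Char := if cs.contains '\'' && !cs.contains '"' then '"' else '\''
  String.ofList (q :: (cs.flatMap (fun c =>
    if c == '\\' then ['\\', '\\']
    else if c == q then ['\\', q]
    else if c == '\t' then ['\\', 't']
    else if c == '\n' then ['\\', 'n']
    else if c == '\r' then ['\\', 'r']
    else [c])) ++ [q])

def pyStrOfPair (a b : String) : String := "[" ++ pyReprStr a ++ ", " ++ pyReprStr b ++ "]"

def prepare (mylist : List (List String)) : List (List String) :=
  (mylist.foldl
    (fun (acc : List (List String) × List (List String)) row =>
      if PySem.Str.len (PySem.List.pyGetD row 0 "") = 4 then (acc.1 ++ [row], acc.2)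
      else if PySem.Str.len (PySem.List.pyGetD row 0 "") < 4 then (acc.1, acc.2 ++ [row])
      else acc)
    ([], [])).2

def dic_edges_str_list (mylist : List (List String)) : PySem.Dict String (List String) :=
  (prepare mylist).foldl
    (fun d line =>
      d.insert (pyStrOfPair (PySem.List.pyGetD line 0 "") (PySem.List.pyGetD line 1 ""))
        [PySem.List.pyGetD line 0 "", PySem.List.pyGetD line 1 ""])
    PySem.Dict.empty

def dic_parents (mylist : List (List String)) : PySem.Dict String (List String) :=
  let de := dic_edges_str_list mylist
  de.keys.foldl
    (fun dp edge =>
      de.keys.foldl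
        (fun dp2 edge2 =>
          if PySem.List.pyGetD (de.getD edge []) 0 "" == PySem.List.pyGetD (de.getD edge2 []) 1 "" then
            if !dp2.contains edge then dp2.insert edge [edge2]
            else dp2.modify edge [] (fun l => l ++ [edge2])
          else dp2)
        dp)
    PySem.Dict.empty

def dic_in_degrees_edges (mylist : List (List String)) : List (String × Int) :=
  let dp := dic_parents mylist
  (dp.keys.foldl
    (fun dd edge => dd.insert edge ((dp.getD edge []).length : Int))
    (PySem.Dict.empty : PySem.Dict String Int)).items

-- ===== PORT B =====
def dic_in_degrees_edges_alt (mylist : List (List String)) : List (String × Int) :=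
  let edges : PySem.Dict String (String × String) :=
    mylist.foldl
      (fun d row =>
        if PySem.Str.len (PySem.List.pyGetD row 0 "") < 4 then
          d.insert (pyStrOfPair (PySem.List.pyGetD row 0 "") (PySem.List.pyGetD row 1 ""))
            (PySem.List.pyGetD row 0 "", PySem.List.pyGetD row 1 "")
        else d)
      PySem.Dict.empty
  let destCount : PySem.Dict String Int :=
    edges.values.foldl (fun d p => d.modify p.2 0 (fun n => n + 1)) PySem.Dict.empty
  edges.items.foldl
    (fun out kp =>
      if destCount.contains kp.2.1 then out ++ [(kp.1, destCount.getD kp.2.1 0)] else out)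
    []

-- ===== PRECONDITION & SPEC =====
-- Pre_ excludes exactly the inputs on which Python A raises IndexError: an empty row (row[0])
-- or a route row (first field shorter than 4 characters) with no second field (line[1]).
def Pre_dic_in_degrees_edges (mylist : List (List String)) : Prop :=
  ∀ row ∈ mylist, PySem.Str.len (PySem.List.pyGetD row 0 "") < 4 → 2 ≤ row.length
instance (mylist : List (List String)) : Decidable (Pre_dic_in_degrees_edges mylist) := by
  unfold Pre_dic_in_degrees_edges; infer_instance

def pvWitness_dic_in_degrees_edges : List (List String) :=
  [["0001", "A"], ["1", "2", "5"], ["2", "1"], ["0002", "B"]]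

def Spec_dic_in_degrees_edges (mylist : List (List String)) (out : List (String × Int)) : Prop :=
  out = dic_in_degrees_edges_alt mylist
instance (mylist : List (List String)) (out : List (String × Int)) : Decidable (Spec_dic_in_degrees_edges mylist out) := by
  unfold Spec_dic_in_degrees_edges; infer_instance

-- ===== CLAIM (what is proved, stated in full; the proofs are below) =====
def Claim_equal_dic_in_degrees_edges : Prop := ∀ (mylist : List (List String)), Dom_dic_in_degrees_edges mylist → Pre_dic_in_degrees_edges mylist → Spec_dic_in_degrees_edges mylist (dic_in_degrees_edges mylist)

-- ===== LEMMAS AND PROOFS =====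

-- shared abbreviations for the proofs
def pvP (row : List String) : Bool := decide (PySem.Str.len (PySem.List.pyGetD row 0 "") < 4)
def pvKey (line : List String) : String :=
  pyStrOfPair (PySem.List.pyGetD line 0 "") (PySem.List.pyGetD line 1 "")
def pvValA (line : List String) : List String :=
  [PySem.List.pyGetD line 0 "", PySem.List.pyGetD line 1 ""]
def pvValB (line : List String) : String × String :=
  (PySem.List.pyGetD line 0 "", PySem.List.pyGetD line 1 "")
def pvG (v : List String) : String × String :=
  (PySem.List.pyGetD v 0 "", PySem.List.pyGetD v 1 "")
def pvQ (de : PySem.Dict String (List String)) (edge e2 : String) : Bool :=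
  PySem.List.pyGetD (de.getD edge []) 0 "" == PySem.List.pyGetD (de.getD e2 []) 1 ""
def pvMatches (de : PySem.Dict String (List String)) (edge : String) : List String :=
  de.keys.filter (pvQ de edge)

theorem pv_prepare_eq_filter (mylist : List (List String)) :
    prepare mylist = mylist.filter pvP := by
  unfold prepare
  have hstep : (fun (acc : List (List String) × List (List String)) row =>
      if PySem.Str.len (PySem.List.pyGetD row 0 "") = 4 then (acc.1 ++ [row], acc.2)
      else if PySem.Str.len (PySem.List.pyGetD row 0 "") < 4 then (acc.1, acc.2 ++ [row])
      else acc)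
    = (fun (acc : List (List String) × List (List String)) row =>
        ((fun (s : List (List String)) (row : List String) =>
            if PySem.Str.len (PySem.List.pyGetD row 0 "") = 4 then s ++ [row] else s) acc.1 row,
         (fun (r : List (List String)) (row : List String) =>
            if pvP row then r ++ [row] else r) acc.2 row)) := by
    funext acc row
    unfold pvP
    split_ifs <;> first | (simp_all; rw [if_neg (by omega)]) | simp_all
  rw [hstep, PySem.List.foldl_prod_mk
    (f := fun (s : List (List String)) (row : List String) =>
      if PySem.Str.len (PySem.List.pyGetD row 0 "") = 4 then s ++ [row] else s)
    (g := fun (r : List (List String)) (row : List String) =>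
      if pvP row then r ++ [row] else r)]
  simp [PySem.List.foldl_append_if_eq_filter]

theorem pv_G_valA (line : List String) : pvG (pvValA line) = (PySem.List.pyGetD line 0 "", PySem.List.pyGetD line 1 "") := by
  simp [pvG, pvValA, PySem.List.pyGetD]

theorem pv_edges_get?_corr :
    ∀ (l : List (List String)) (dA : PySem.Dict String (List String)) (dB : PySem.Dict String (String × String)),
    (∀ k, dB.get? k = (dA.get? k).map pvG) →
    ∀ k, (l.foldl (fun d line => d.insert (pvKey line) (pvValB line)) dB).get? k
        = ((l.foldl (fun d line => d.insert (pvKey line) (pvValA line)) dA).get? k).map pvG := by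
  intro l
  induction l with
  | nil => intro dA dB h k; simpa using h k
  | cons line t ih =>
    intro dA dB h k
    simp only [List.foldl_cons]
    apply ih
    intro k'
    rw [PySem.Dict.get?_insert, PySem.Dict.get?_insert]
    by_cases hk : k' = pvKey line
    · simp [hk, ← pv_G_valA, pvValB]
    · simp [hk, h k']

theorem pv_step_eq_modify (edge e2 : String) (dp : PySem.Dict String (List String)) :
    (if !dp.contains edge then dp.insert edge [e2] else dp.modify edge [] (fun l => l ++ [e2]))
      = dp.modify edge [] (fun l => l ++ [e2]) := by
  by_cases h : dp.contains edge
  · simp [h]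
  · simp only [Bool.not_eq_true] at h
    simp [h, PySem.Dict.modify, PySem.Dict.getD_of_not_contains _ _ h]

theorem pv_modfold_getD_self (edge : String) :
    ∀ (l : List String) (dp : PySem.Dict String (List String)),
    (l.foldl (fun dp2 e2 => dp2.modify edge [] (fun v => v ++ [e2])) dp).getD edge []
      = dp.getD edge [] ++ l := by
  intro l
  induction l with
  | nil => intro dp; simp
  | cons e t ih =>
    intro dp
    simp only [List.foldl_cons]
    rw [ih, PySem.Dict.getD_modify_self]
    simp

theorem pv_modfold_getD_other (edge k : String) (h : k ≠ edge) :
    ∀ (l : List String) (dp : PySem.Dict String (List String)),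
    (l.foldl (fun dp2 e2 => dp2.modify edge [] (fun v => v ++ [e2])) dp).getD k []
      = dp.getD k [] := by
  intro l
  induction l with
  | nil => intro dp; simp
  | cons e t ih =>
    intro dp
    simp only [List.foldl_cons]
    rw [ih, PySem.Dict.getD_modify]
    simp [h]

theorem pv_keys_modify_add {ν : Type} (dp : PySem.Dict String ν) (k : String) (d0 : ν) (f : ν → ν) :
    (dp.modify k d0 f).keys = PySem.Set.add dp.keys k := by
  rw [PySem.Dict.keys_modify]
  by_cases h : dp.contains k
  · rw [PySem.Dict.keys_insert_of_contains _ _ h,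
      PySem.Set.add_of_mem ((PySem.Dict.contains_iff_mem_keys dp k).mp h)]
  · simp only [Bool.not_eq_true] at h
    rw [PySem.Dict.keys_insert_of_not_contains _ _ h,
      PySem.Set.add_of_not_mem (fun hm => by simp [(PySem.Dict.contains_iff_mem_keys dp k).mpr hm] at h)]

theorem pv_modfold_keys (edge : String) :
    ∀ (l : List String) (dp : PySem.Dict String (List String)),
    (l.foldl (fun dp2 e2 => dp2.modify edge [] (fun v => v ++ [e2])) dp).keys
      = if l = [] then dp.keys else PySem.Set.add dp.keys edge := by
  intro l
  induction l with
  | nil => intro dp; simp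
  | cons e t ih =>
    intro dp
    simp only [List.foldl_cons]
    rw [ih, pv_keys_modify_add]
    by_cases ht : t = []
    · simp [ht]
    · rw [if_neg ht, if_neg (by simp), PySem.Set.add_of_mem ((PySem.Set.mem_add _ _ _).mpr (Or.inr rfl))]

-- inner loop of dic_parents, characterised
theorem pv_inner_eq_modfold (de : PySem.Dict String (List String)) (edge : String)
    (l : List String) (dp : PySem.Dict String (List String)) :
    (l.foldl
      (fun dp2 e2 =>
        if pvQ de edge e2 then
          if !dp2.contains edge then dp2.insert edge [e2]
          else dp2.modify edge [] (fun v => v ++ [e2])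
        else dp2) dp)
    = ((l.filter (pvQ de edge)).foldl (fun dp2 e2 => dp2.modify edge [] (fun v => v ++ [e2])) dp) := by
  rw [PySem.List.foldl_if_eq_foldl_filter]
  congr 1
  funext dp2 e2
  exact pv_step_eq_modify edge e2 dp2

-- outer loop of dic_parents, characterised
theorem pv_outer_char (de : PySem.Dict String (List String)) :
    ∀ (rest : List String) (dp : PySem.Dict String (List String)),
    rest.Nodup → (∀ k ∈ rest, k ∉ dp.keys) →
    ((rest.foldl
        (fun dp edge =>
          de.keys.foldl
            (fun dp2 e2 =>
              if pvQ de edge e2 then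
                if !dp2.contains edge then dp2.insert edge [e2]
                else dp2.modify edge [] (fun v => v ++ [e2])
              else dp2) dp)
        dp).keys
      = dp.keys ++ rest.filter (fun k => !(pvMatches de k).isEmpty))
    ∧ (∀ k, (rest.foldl
        (fun dp edge =>
          de.keys.foldl
            (fun dp2 e2 =>
              if pvQ de edge e2 then
                if !dp2.contains edge then dp2.insert edge [e2]
                else dp2.modify edge [] (fun v => v ++ [e2])
              else dp2) dp)
        dp).getD k []
      = if k ∈ rest ∧ (pvMatches de k ≠ []) then pvMatches de k else dp.getD k []) := by
  intro rest
  induction rest with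
  | nil => intro dp _ _; constructor
           · simp
           · intro k; simp
  | cons edge rest' ih =>
    intro dp hnd hfresh
    have hmemedge : edge ∉ dp.keys := hfresh edge (by simp)
    have hcont : dp.contains edge = false := by
      cases hc : dp.contains edge
      · rfl
      · exact absurd ((PySem.Dict.contains_iff_mem_keys dp edge).mp hc) hmemedge
    simp only [List.foldl_cons]
    rw [pv_inner_eq_modfold de edge de.keys dp]
    set dp' := (de.keys.filter (pvQ de edge)).foldl
        (fun dp2 e2 => dp2.modify edge [] (fun v => v ++ [e2])) dp with hdp'
    have hK' : dp'.keys = if pvMatches de edge = [] then dp.keys else dp.keys ++ [edge] := by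
      rw [hdp', pv_modfold_keys]
      by_cases hm : de.keys.filter (pvQ de edge) = []
      · simp [hm, pvMatches]
      · rw [if_neg hm, if_neg (by simpa [pvMatches] using hm),
          PySem.Set.add_of_not_mem hmemedge]
    have hGself : dp'.getD edge [] = pvMatches de edge := by
      rw [hdp', pv_modfold_getD_self, PySem.Dict.getD_of_not_contains _ _ hcont]
      simp [pvMatches]
    have hGother : ∀ k, k ≠ edge → dp'.getD k [] = dp.getD k [] := by
      intro k hk
      rw [hdp', pv_modfold_getD_other edge k hk]
    have hnd' : rest'.Nodup := (List.nodup_cons.mp hnd).2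
    have hedge' : edge ∉ rest' := (List.nodup_cons.mp hnd).1
    have hfresh' : ∀ k ∈ rest', k ∉ dp'.keys := by
      intro k hk
      rw [hK']
      by_cases hm : pvMatches de edge = []
      · rw [if_pos hm]; exact hfresh k (by simp [hk])
      · rw [if_neg hm]
        intro hmem
        rcases List.mem_append.mp hmem with h1 | h1
        · exact hfresh k (by simp [hk]) h1
        · exact hedge' (by simpa using (List.mem_singleton.mp h1) ▸ hk)
    obtain ⟨ihK, ihG⟩ := ih dp' hnd' hfresh'
    constructor
    · rw [ihK, hK', List.filter_cons]
      by_cases hm : pvMatches de edge = []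
      · simp [hm]
      · have hb : (!(pvMatches de edge).isEmpty) = true := by
          simp [hm]
        simp [hm, hb]
    · intro k
      rw [ihG k]
      by_cases hk : k = edge
      · subst hk
        rw [if_neg (fun hc => hedge' hc.1), hGself]
        by_cases hm : pvMatches de k = []
        · rw [if_neg (fun hc => hc.2 hm), hm,
            PySem.Dict.getD_of_not_contains _ _ hcont]
        · rw [if_pos ⟨by simp, hm⟩]
      · rw [hGother k hk]
        by_cases hmem : k ∈ rest' ∧ pvMatches de k ≠ []
        · rw [if_pos hmem, if_pos ⟨by simp [hmem.1], hmem.2⟩]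
        · rw [if_neg hmem, if_neg (by
            rintro ⟨hmem1, hmem2⟩
            rcases List.mem_cons.mp hmem1 with h1 | h1
            · exact hk h1
            · exact hmem ⟨h1, hmem2⟩)]

theorem pv_A_char (mylist : List (List String)) :
    dic_in_degrees_edges mylist
      = ((dic_edges_str_list mylist).keys.filter
            (fun k => !(pvMatches (dic_edges_str_list mylist) k).isEmpty)).map
          (fun k => (k, ((pvMatches (dic_edges_str_list mylist) k).length : Int))) := by
  have hrfl : dic_in_degrees_edges mylist =
      (let de := dic_edges_str_list mylist
       let dp := de.keys.foldl
          (fun dp edge =>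
            de.keys.foldl
              (fun dp2 e2 =>
                if pvQ de edge e2 then
                  if !dp2.contains edge then dp2.insert edge [e2]
                  else dp2.modify edge [] (fun v => v ++ [e2])
                else dp2) dp)
          PySem.Dict.empty
       (dp.keys.foldl
          (fun dd edge => dd.insert edge ((dp.getD edge []).length : Int))
          (PySem.Dict.empty : PySem.Dict String Int)).items) := rfl
  rw [hrfl]
  simp only []
  set de := dic_edges_str_list mylist with hde
  have hndK : de.keys.Nodup := by
    rw [hde]
    exact PySem.Dict.nodup_keys_foldl_insert_key (prepare mylist)
      (fun line => pvKey line) (fun d line => pvValA line) PySem.Dict.empty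
      PySem.Dict.nodup_keys_empty
  obtain ⟨hK, hG⟩ := pv_outer_char de de.keys PySem.Dict.empty hndK
    (by intro k hk; simp [PySem.Dict.keys_empty])
  set dpF := de.keys.foldl
      (fun dp edge =>
        de.keys.foldl
          (fun dp2 e2 =>
            if pvQ de edge e2 then
              if !dp2.contains edge then dp2.insert edge [e2]
              else dp2.modify edge [] (fun v => v ++ [e2])
            else dp2) dp)
      PySem.Dict.empty with hdpF
  have hKF : dpF.keys = de.keys.filter (fun k => !(pvMatches de k).isEmpty) := by
    rw [hdpF, hK]; simp [PySem.Dict.keys_empty]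
  have hndF : dpF.keys.Nodup := by rw [hKF]; exact hndK.filter _
  have hfreshF : ∀ a ∈ dpF.keys, (PySem.Dict.empty : PySem.Dict String Int).contains a = false := by
    intro a _; exact PySem.Dict.contains_empty a
  have hitems := PySem.Dict.items_foldl_insert_fresh dpF.keys (fun a => a)
      (fun a => ((dpF.getD a []).length : Int)) PySem.Dict.empty hfreshF
      (by simpa using hndF)
  simp only [] at hitems
  rw [hitems]
  rw [show (PySem.Dict.empty : PySem.Dict String Int).items = [] from rfl, List.nil_append, hKF]
  apply List.map_congr_left
  intro k hkf
  have hkK : k ∈ de.keys := List.mem_of_mem_filter hkf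
  have hmne : pvMatches de k ≠ [] := by
    have := List.of_mem_filter hkf
    simpa [List.isEmpty_iff] using this
  rw [hG k, if_pos ⟨hkK, hmne⟩]

theorem pv_B_char (mylist : List (List String)) :
    dic_in_degrees_edges_alt mylist
      = ((dic_edges_str_list mylist).keys.filter
            (fun k => !(pvMatches (dic_edges_str_list mylist) k).isEmpty)).map
          (fun k => (k, ((pvMatches (dic_edges_str_list mylist) k).length : Int))) := by
  have hrfl : dic_in_degrees_edges_alt mylist =
      (let edges := mylist.foldl
          (fun d row =>
            if PySem.Str.len (PySem.List.pyGetD row 0 "") < 4 then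
              d.insert (pvKey row) (pvValB row)
            else d) PySem.Dict.empty
       let destCount := edges.values.foldl
          (fun d p => d.modify p.2 0 (fun n => n + 1)) PySem.Dict.empty
       edges.items.foldl
        (fun out kp =>
          if destCount.contains kp.2.1 then out ++ [(kp.1, destCount.getD kp.2.1 0)] else out)
        []) := rfl
  rw [hrfl]
  simp only []
  rw [PySem.List.foldl_ite_eq_foldl_filter
      (p := fun row : List String => PySem.Str.len (PySem.List.pyGetD row 0 "") < 4)
      (f := fun (d : PySem.Dict String (String × String)) (row : List String) =>
        d.insert (pvKey row) (pvValB row))]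
  rw [show (mylist.filter (fun row => decide (PySem.Str.len (PySem.List.pyGetD row 0 "") < 4)))
        = mylist.filter pvP from rfl]
  set de := dic_edges_str_list mylist with hde
  have hA : de = (mylist.filter pvP).foldl
      (fun d line => d.insert (pvKey line) (pvValA line)) PySem.Dict.empty := by
    rw [hde]
    unfold dic_edges_str_list
    rw [pv_prepare_eq_filter]
    rfl
  set EB := (mylist.filter pvP).foldl
      (fun d row => d.insert (pvKey row) (pvValB row)) PySem.Dict.empty with hEB
  have hcorr : ∀ k, EB.get? k = (de.get? k).map pvG := by
    intro k
    rw [hEB, hA]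
    exact pv_edges_get?_corr (mylist.filter pvP) PySem.Dict.empty PySem.Dict.empty
      (by intro k'; simp [PySem.Dict.get?_empty]) k
  have hkeysEB : EB.keys = de.keys := by
    rw [hEB, hA,
      PySem.Dict.keys_foldl_insert_key _ pvKey (fun d line => pvValB line),
      PySem.Dict.keys_foldl_insert_key _ pvKey (fun d line => pvValA line)]
    rfl
  have hndK : de.keys.Nodup := by
    rw [hA]
    exact PySem.Dict.nodup_keys_foldl_insert_key (mylist.filter pvP)
      (fun line => pvKey line) (fun d line => pvValA line) PySem.Dict.empty
      PySem.Dict.nodup_keys_empty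
  have hndEB : EB.keys.Nodup := hkeysEB ▸ hndK
  have hgetEB : ∀ k ∈ de.keys, EB.getD k ("", "") = pvG (de.getD k []) := by
    intro k hk
    obtain ⟨v, hv⟩ : ∃ v, de.get? k = some v := by
      cases hc : de.get? k with
      | none => exact absurd hk ((PySem.Dict.get?_eq_none_iff_not_mem_keys de k).mp hc)
      | some v => exact ⟨v, rfl⟩
    have h1 : EB.getD k ("", "") = pvG v := by
      rw [PySem.Dict.getD_eq_get?_getD, hcorr k, hv]; rfl
    have h2 : de.getD k [] = v := by
      rw [PySem.Dict.getD_eq_get?_getD, hv]; rfl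
    rw [h1, h2]
  rw [PySem.Dict.items_eq_map_keys EB hndEB ("", "")]
  have hdc : EB.values.foldl (fun d p => d.modify p.2 0 (fun n => n + 1)) PySem.Dict.empty
      = PySem.Dict.counter (EB.values.map (fun p => p.2)) := by
    rw [PySem.Dict.counter_eq_foldl, List.foldl_map]
  rw [hdc]
  set dsts := EB.values.map (fun p => p.2) with hdsts
  have hvals : dsts = de.keys.map (fun k => (pvG (de.getD k [])).2) := by
    rw [hdsts, PySem.Dict.values_eq_map_keys EB hndEB ("", ""), hkeysEB, List.map_map]
    exact List.map_congr_left (fun k hk => by simp [hgetEB k hk])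
  rw [PySem.List.foldl_append_if
      (p := fun kp : String × (String × String) => (PySem.Dict.counter dsts).contains kp.2.1)
      (f := fun kp : String × (String × String) => (kp.1, (PySem.Dict.counter dsts).getD kp.2.1 0))]
  rw [List.nil_append, hkeysEB, List.filter_map, List.map_map]
  have hsrc : ∀ k ∈ de.keys,
      ((fun kp : String × (String × String) => (PySem.Dict.counter dsts).contains kp.2.1) ∘
        (fun k => (k, EB.getD k ("", "")))) k = (!(pvMatches de k).isEmpty) := by
    intro k hk
    simp only [Function.comp_apply, hgetEB k hk]
    rw [PySem.Dict.contains_counter, hvals]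
    rw [Bool.eq_iff_iff]
    constructor
    · intro hcont
      have hmem : (pvG (de.getD k [])).1 ∈
          de.keys.map (fun k2 => (pvG (de.getD k2 [])).2) :=
        List.mem_of_elem_eq_true hcont
      obtain ⟨k2, hk2, heq⟩ := List.mem_map.mp hmem
      simp only [Bool.not_eq_true', List.isEmpty_eq_false_iff, ne_eq, pvMatches,
        List.filter_eq_nil_iff, not_forall]
      refine ⟨k2, ⟨hk2, ?_⟩⟩
      exact not_not_intro (by simp only [pvQ, beq_iff_eq]; exact heq.symm)
    · intro hne
      have : pvMatches de k ≠ [] := by simpa [List.isEmpty_iff] using hne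
      obtain ⟨k2, hk2⟩ := List.exists_mem_of_ne_nil _ this
      have hk2K : k2 ∈ de.keys := List.mem_of_mem_filter hk2
      have hq : pvQ de k k2 = true := List.of_mem_filter hk2
      have hq' : PySem.List.pyGetD (de.getD k []) 0 "" = PySem.List.pyGetD (de.getD k2 []) 1 "" := by
        simpa [pvQ] using hq
      have : (pvG (de.getD k [])).1 ∈ de.keys.map (fun k2 => (pvG (de.getD k2 [])).2) :=
        List.mem_map.mpr ⟨k2, hk2K, hq'.symm⟩
      exact List.elem_eq_true_of_mem this
  rw [List.filter_congr hsrc]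
  apply List.map_congr_left
  intro k hkf
  have hkK : k ∈ de.keys := List.mem_of_mem_filter hkf
  simp only [Function.comp_apply, hgetEB k hkK]
  rw [PySem.Dict.getD_counter, hvals]
  congr 1
  rw [List.count_eq_countP, List.countP_map, List.countP_eq_length_filter]
  simp only [pvMatches]
  have hfc : List.filter ((fun x => x == (pvG (de.getD k [])).1) ∘ fun k2 => (pvG (de.getD k2 [])).2) de.keys
      = List.filter (pvQ de k) de.keys :=
    List.filter_congr (fun x hx => by
      simp only [Function.comp_apply]
      unfold pvQ
      exact Bool.beq_comm)
  rw [hfc]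

-- ===== VERDICT (by name: the statement is the Claim_ definition above) =====
theorem dic_in_degrees_edges_spec : Claim_equal_dic_in_degrees_edges := by
  intro mylist _ _
  unfold Spec_dic_in_degrees_edges
  rw [pv_A_char, pv_B_char]
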